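-- pv_equiv track=rewrite | github.com/cabadilla/analisis | proyecto1/HojaBlanco.py | CombinacionesColor
-- ===== SOURCE A (Python) =====
-- def CombinacionesColor(ListaFichas, N):
--     '''
--     Objetivo: Funcion que saca las cominaciones de fichas que tenga dependiendo del color
--     Recibe: Fichas que tenga en la mano y un numero para poder iterar
--     Retorna: La lista de las combinaciones
--     '''
--     if N>5:
--         return []
--     else:
--         Lista=[]
--         Lista.append(ListaFichas[N])
--         for i in range(N+1, 6):
--             if ListaFichas[i] in Lista:
--                 Lista.append(ListaFichas[i])
--         return [Lista]+CombinacionesColor(ListaFichas, N+1)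
-- ===== SOURCE B (Python) =====
-- def CombinacionesColor(ListaFichas, N):
--     '''
--     Iterative re-implementation: one group per starting index n in range(N, 6),
--     built with a comprehension keeping the later tiles equal to the group's head
--     (every member of A's group equals its first element, so `in` = equality with head).
--     '''
--     Resultado = []
--     for n in range(N, 6):
--         cabeza = ListaFichas[n]
--         Resultado.append([cabeza] + [ListaFichas[i] for i in range(n + 1, 6)
--                                      if ListaFichas[i] == cabeza])
--     return Resultado
-- ===== Notes on version B (the rewrite author's own statement) =====
-- stated objective: simpler
-- what changed: Replaces the recursion over N and the membership-growing accumulator with a flat iterative loop over range(N,6) that builds each group by a comprehension comparing later tiles for equality with the group's head (valid because every member of A's group equals its first element).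
import Mathlib
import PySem

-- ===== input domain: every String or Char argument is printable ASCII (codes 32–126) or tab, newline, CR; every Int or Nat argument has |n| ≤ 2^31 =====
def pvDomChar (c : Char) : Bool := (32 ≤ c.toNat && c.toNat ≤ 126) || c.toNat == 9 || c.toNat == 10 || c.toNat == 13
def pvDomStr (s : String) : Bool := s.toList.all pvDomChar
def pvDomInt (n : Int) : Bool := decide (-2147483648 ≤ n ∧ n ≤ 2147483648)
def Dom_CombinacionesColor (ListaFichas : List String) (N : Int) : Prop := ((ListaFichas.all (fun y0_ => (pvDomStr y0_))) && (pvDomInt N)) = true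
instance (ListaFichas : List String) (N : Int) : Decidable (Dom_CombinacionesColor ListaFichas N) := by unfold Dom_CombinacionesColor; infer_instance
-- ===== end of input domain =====

-- B replaces A's recursion over N and growing-membership accumulator with a flat loop
-- over range(N,6) building each group by equality-with-head comprehension (objective: simpler).


-- ===== PORT A =====
-- literal transliteration of A's recursion; ListaFichas[i] is ported with
-- PySem.List.pyGetD (default "") — exact wherever Python does not raise, i.e. on Pre_.
def CombinacionesColor (ListaFichas : List String) (N : Int) : List (List String) :=
  if N > 5 then []
  else
    let Lista : List String :=
      (PySem.List.pyRange (N + 1) 6 1).foldl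
        (fun acc i =>
          if acc.contains (PySem.List.pyGetD ListaFichas i "") then
            acc ++ [PySem.List.pyGetD ListaFichas i ""]
          else acc)
        [PySem.List.pyGetD ListaFichas N ""]
    [Lista] ++ CombinacionesColor ListaFichas (N + 1)
termination_by (6 - N).toNat
decreasing_by omega

-- ===== PORT B =====
-- literal transliteration of Source B: loop over range(N,6) appending one group each step,
-- the group = head :: comprehension over range(n+1,6) keeping tiles equal to the head.
def CombinacionesColor_alt (ListaFichas : List String) (N : Int) : List (List String) :=
  (PySem.List.pyRange N 6 1).foldl
    (fun Resultado n =>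
      let cabeza := PySem.List.pyGetD ListaFichas n ""
      Resultado ++
        [cabeza ::
          ((PySem.List.pyRange (n + 1) 6 1).filterMap (fun i =>
            if PySem.List.pyGetD ListaFichas i "" = cabeza then
              some (PySem.List.pyGetD ListaFichas i "")
            else none))])
    []

-- ===== PRECONDITION & SPEC =====
-- exactly the inputs on which Python A returns (no IndexError): either N > 5
-- (immediate []), or the hand has at least the 6 indexed tiles and N is a valid
-- (possibly negative) Python index.
def Pre_CombinacionesColor (ListaFichas : List String) (N : Int) : Prop :=
  N > 5 ∨ (6 ≤ ListaFichas.length ∧ -(ListaFichas.length : Int) ≤ N)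
instance (ListaFichas : List String) (N : Int) : Decidable (Pre_CombinacionesColor ListaFichas N) := by unfold Pre_CombinacionesColor; infer_instance

def pvWitness_CombinacionesColor : List String × Int := (["r", "g", "r", "b", "g", "r"], 0)

def Spec_CombinacionesColor (ListaFichas : List String) (N : Int) (out : List (List String)) : Prop := out = CombinacionesColor_alt ListaFichas N
instance (ListaFichas : List String) (N : Int) (out : List (List String)) : Decidable (Spec_CombinacionesColor ListaFichas N out) := by unfold Spec_CombinacionesColor; infer_instance

-- ===== CLAIM (what is proved, stated in full; the proofs are below) =====
def Claim_equal_CombinacionesColor : Prop := ∀ (ListaFichas : List String) (N : Int), Dom_CombinacionesColor ListaFichas N → Pre_CombinacionesColor ListaFichas N → Spec_CombinacionesColor ListaFichas N (CombinacionesColor ListaFichas N)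

-- ===== LEMMAS AND PROOFS =====

-- A's inner loop over any index list, started from any nonempty accumulator whose
-- members all equal f, appends exactly the tiles equal to f (the `in` test is
-- equality with the head because the accumulator only ever holds copies of f).
theorem combColor_inner (L : List String) (f : String) :
    ∀ (is : List Int) (pre : List String), pre ≠ [] → (∀ y ∈ pre, y = f) →
    is.foldl
      (fun acc i =>
        if acc.contains (PySem.List.pyGetD L i "") then
          acc ++ [PySem.List.pyGetD L i ""]
        else acc) pre
    = pre ++ is.filterMap (fun i =>
        if PySem.List.pyGetD L i "" = f then some (PySem.List.pyGetD L i "") else none) := by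
  intro is
  induction is with
  | nil => intro pre _ _; simp
  | cons i is ih =>
    intro pre hne hall
    have hcontains : pre.contains (PySem.List.pyGetD L i "") =
        decide (PySem.List.pyGetD L i "" = f) := by
      have hiff : (PySem.List.pyGetD L i "" ∈ pre) ↔ (PySem.List.pyGetD L i "" = f) := by
        constructor
        · exact fun hm => hall _ hm
        · intro he
          rcases pre with _ | ⟨y, ys⟩
          · exact absurd rfl hne
          · have hy : y = f := hall y (by simp)
            rw [he, ← hy]; simp
      simp [hiff]
    simp only [List.foldl_cons, List.filterMap_cons, hcontains]
    rcases (decEq (PySem.List.pyGetD L i "") f) with h | h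
    · simp only [h, decide_false]
      rw [if_neg (by simp)]
      exact ih pre hne hall
    · subst h
      rw [if_pos (by simp)]
      rw [ih (pre ++ [PySem.List.pyGetD L i ""]) (by simp) ?_]
      · simp
      · intro y hy
        rcases List.mem_append.mp hy with h | h
        · exact hall y h
        · simpa using h

-- B's fold over pyRange N 6 1 with any accumulated prefix.
theorem combColor_alt_acc (L : List String) :
    ∀ (k : Nat) (N : Int), 6 - N = (k : Int) →
    ∀ (R : List (List String)),
    (PySem.List.pyRange N 6 1).foldl
      (fun Resultado n =>
        let cabeza := PySem.List.pyGetD L n ""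
        Resultado ++
          [cabeza ::
            ((PySem.List.pyRange (n + 1) 6 1).filterMap (fun i =>
              if PySem.List.pyGetD L i "" = cabeza then
                some (PySem.List.pyGetD L i "")
              else none))]) R
    = R ++ CombinacionesColor_alt L N := by
  intro k
  induction k with
  | zero =>
    intro N hN R
    have h6 : (6:Int) ≤ N := by omega
    rw [PySem.List.pyRange_one_eq_nil h6]
    simp [CombinacionesColor_alt, PySem.List.pyRange_one_eq_nil h6]
  | succ k ih =>
    intro N hN R
    have hlt : N < 6 := by omega
    rw [PySem.List.pyRange_one_cons hlt]
    simp only [List.foldl_cons]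
    rw [ih (N+1) (by omega)]
    conv_rhs => rw [CombinacionesColor_alt, PySem.List.pyRange_one_cons hlt]
    simp only [List.foldl_cons]
    rw [show ((CombinacionesColor_alt L (N+1) : List (List String))) =
        [] ++ CombinacionesColor_alt L (N+1) from (List.nil_append _).symm]
    rw [← ih (N+1) (by omega)]
    simp

-- head-recursion unfolding of B
theorem combColor_alt_cons (L : List String) (N : Int) (h : N < 6) :
    CombinacionesColor_alt L N =
      (PySem.List.pyGetD L N "" ::
        ((PySem.List.pyRange (N + 1) 6 1).filterMap (fun i =>
          if PySem.List.pyGetD L i "" = PySem.List.pyGetD L N "" then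
            some (PySem.List.pyGetD L i "")
          else none))) :: CombinacionesColor_alt L (N + 1) := by
  conv_lhs => rw [CombinacionesColor_alt, PySem.List.pyRange_one_cons h]
  simp only [List.foldl_cons, List.nil_append]
  rw [combColor_alt_acc L (6 - (N+1)).toNat (N+1) (by omega)]
  simp

theorem combColor_eq (L : List String) :
    ∀ (k : Nat) (N : Int), 6 - N ≤ (k : Int) →
    CombinacionesColor L N = CombinacionesColor_alt L N := by
  intro k
  induction k with
  | zero =>
    intro N h
    have h6 : N > 5 := by omega
    rw [CombinacionesColor, if_pos h6, CombinacionesColor_alt,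
        PySem.List.pyRange_one_eq_nil (by omega), List.foldl_nil]
  | succ k ih =>
    intro N h
    by_cases h6 : N > 5
    · rw [CombinacionesColor, if_pos h6, CombinacionesColor_alt,
          PySem.List.pyRange_one_eq_nil (by omega), List.foldl_nil]
    · rw [CombinacionesColor, if_neg h6]
      rw [combColor_alt_cons L N (by omega)]
      rw [ih (N+1) (by omega)]
      simp only [List.cons_append, List.nil_append, List.cons.injEq, and_true]
      rw [combColor_inner L (PySem.List.pyGetD L N "") (PySem.List.pyRange (N+1) 6 1)
          [PySem.List.pyGetD L N ""] (by simp) (by simp)]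
      simp

-- ===== VERDICT (by name: the statement is the Claim_ definition above) =====
theorem CombinacionesColor_spec : Claim_equal_CombinacionesColor := by
  intro L N _ _
  unfold Spec_CombinacionesColor
  exact combColor_eq L (6 - N).toNat N (by omega)
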